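-- pv_equiv track=rewrite | github.com/amardeep2012/seatbooking | app.py | book_seats
-- ===== SOURCE A (Python) =====
-- def book_seats(seats, num_seats):
--     rows = len(seats)
--     cols = len(seats[0])
--     booked_seats = []
--
--     for row in range(rows):
--         consecutive_available_seats = 0
--         start_seat = -1
--
--         for col in range(cols):
--             if seats[row][col] == 0:
--                 if consecutive_available_seats == 0:
--                     start_seat = col
--                 consecutive_available_seats += 1
--             else:
--                 consecutive_available_seats = 0
--
--             if consecutive_available_seats == num_seats:
--                 for i in range(num_seats):
--                     seats[row][start_seat + i] = 1
--                     booked_seats.append((row + 1, start_seat + i + 1))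
--                 break
--
--         if len(booked_seats) == num_seats:
--             break
--
--     return booked_seats
-- ===== SOURCE B (Python) =====
-- def book_seats(seats, num_seats):
--     # Same return value and same in-place booking (cells set to 1) as the original.
--     cols = len(seats[0])
--     for r, row in enumerate(seats):
--         for start in range(cols - num_seats + 1):
--             if all(x == 0 for x in row[start:start + num_seats]):
--                 for i in range(num_seats):
--                     row[start + i] = 1
--                 return [(r + 1, start + i + 1) for i in range(num_seats)]
--     return []
-- ===== Notes on version B (the rewrite author's own statement) =====
-- stated objective: idiomatic
-- what changed: Replaces A's running-counter state machine (consecutive counter + remembered start with break bookkeeping across two loops) by a windowed scan: for each start column test the slice row[start:start+num_seats] for all-zero and return the booking on the first hit; the slice + all() inner test runs in C instead of A's per-cell Python-level loop.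
-- outside the precondition, e.g. on book_seats([[0, 0], [0]], 2): A returns [(1, 1), (1, 2)], B returns [(1, 1), (1, 2)]
import Mathlib
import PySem

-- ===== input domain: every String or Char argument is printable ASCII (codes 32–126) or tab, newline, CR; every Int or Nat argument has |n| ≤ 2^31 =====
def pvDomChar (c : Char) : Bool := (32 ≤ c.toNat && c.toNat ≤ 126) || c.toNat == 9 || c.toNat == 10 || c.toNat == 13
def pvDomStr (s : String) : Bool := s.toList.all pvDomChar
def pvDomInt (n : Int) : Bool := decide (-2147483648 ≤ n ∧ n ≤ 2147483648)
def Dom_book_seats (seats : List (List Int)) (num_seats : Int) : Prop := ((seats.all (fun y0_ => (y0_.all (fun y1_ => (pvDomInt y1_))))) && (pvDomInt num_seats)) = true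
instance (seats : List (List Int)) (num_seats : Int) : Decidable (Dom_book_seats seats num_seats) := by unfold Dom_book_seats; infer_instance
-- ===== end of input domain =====

-- B replaces A's running-counter single pass by a per-start-column windowed slice test;
-- both Pythons also book the found seats in place (set to 1) identically — the theorems here are about the return value.

-- ===== PORT A =====
-- inner `for col in range(cols)` loop of A: state = (consecutive_available_seats, start_seat); books and breaks when the counter hits num_seats
def bookInnerA (row : List Int) (n r : Int) : List Nat → Int → Int → List (Int × Int)
  | [], _, _ => []
  | c :: rest, consec, start =>
    let st : Int × Int :=
      if row.getD c 0 = 0 then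
        (consec + 1, if consec = 0 then (c : Int) else start)
      else (0, start)
    if st.1 = n then
      (PySem.List.pyRange 0 n 1).map (fun i => (r + 1, st.2 + i + 1))
    else bookInnerA row n r rest st.1 st.2

-- outer `for row in range(rows)` loop of A: appends each row's bookings, breaks when len(booked) == num_seats
def bookOuterA (n : Int) (cols : Nat) : List (List Int) → Int → List (Int × Int) → List (Int × Int)
  | [], _, booked => booked
  | row :: rest, r, booked =>
    let booked2 := booked ++ bookInnerA row n r (List.range cols) 0 (-1)
    if (booked2.length : Int) = n then booked2
    else bookOuterA n cols rest (r + 1) booked2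

def book_seats (seats : List (List Int)) (num_seats : Int) : List (Int × Int) :=
  match seats with
  | [] => []   -- Python A raises IndexError on `seats[0]` here; excluded by Pre_
  | r0 :: _ => bookOuterA num_seats r0.length seats 0 []

-- ===== PORT B =====
-- `all(x == 0 for x in row[start:start+num_seats])`
def winB (row : List Int) (s n : Int) : Bool :=
  (PySem.List.slice row (some s) (some (s + n))).all (fun x => x == 0)

-- inner `for start in range(cols - num_seats + 1)` loop of B, as an index recursion
def tryRowB (row : List Int) (r n s hi : Int) : Option (List (Int × Int)) :=
  if h : s < hi then
    if winB row s n then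
      some ((PySem.List.pyRange 0 n 1).map (fun i => (r + 1, s + i + 1)))
    else tryRowB row r n (s + 1) hi
  else none
termination_by (hi - s).toNat
decreasing_by omega

-- outer `for r, row in enumerate(seats)` loop of B
def rowsB (n : Int) (cols : Nat) : List (List Int) → Int → List (Int × Int)
  | [], _ => []
  | row :: rest, r =>
    match tryRowB row r n 0 ((cols : Int) - n + 1) with
    | some b => b
    | none => rowsB n cols rest (r + 1)

def book_seats_alt (seats : List (List Int)) (num_seats : Int) : List (Int × Int) :=
  match seats with
  | [] => []   -- Python B raises IndexError on `seats[0]` here; excluded by Pre_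
  | r0 :: _ => rowsB num_seats r0.length seats 0

-- ===== PRECONDITION & SPEC =====
-- Pre_ excludes the empty grid, where A raises IndexError on seats[0], and grids containing a
-- row shorter than the first row, where A raises IndexError unless it happens to book before
-- reaching the short row.
def Pre_book_seats (seats : List (List Int)) (num_seats : Int) : Prop :=
  seats ≠ [] ∧ ∀ row ∈ seats, (seats.headI).length ≤ row.length

instance (seats : List (List Int)) (num_seats : Int) : Decidable (Pre_book_seats seats num_seats) := by
  unfold Pre_book_seats; infer_instance

def pvWitness_book_seats : List (List Int) × Int := ([[1, 0, 0], [0, 0, 0]], 2)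


def Spec_book_seats (seats : List (List Int)) (num_seats : Int) (out : List (Int × Int)) : Prop := out = book_seats_alt seats num_seats
instance (seats : List (List Int)) (num_seats : Int) (out : List (Int × Int)) : Decidable (Spec_book_seats seats num_seats out) := by unfold Spec_book_seats; infer_instance

-- ===== CLAIM (what is proved, stated in full; the proofs are below) =====
def Claim_equal_book_seats : Prop := ∀ (seats : List (List Int)) (num_seats : Int), Dom_book_seats seats num_seats → Pre_book_seats seats num_seats → Spec_book_seats seats num_seats (book_seats seats num_seats)

-- ===== LEMMAS AND PROOFS =====

def optD (o : Option (List (Int × Int))) : List (Int × Int) := o.getD []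

lemma tryRowB_none (row : List Int) (r n s hi : Int) (h : hi ≤ s) :
    tryRowB row r n s hi = none := by
  unfold tryRowB
  rw [dif_neg (by omega)]

lemma tryRowB_skip (row : List Int) (r n : Int) : ∀ (a b hi : Int), a ≤ b →
    (∀ s, a ≤ s → s < b → s < hi → winB row s n = false) →
    tryRowB row r n a hi = tryRowB row r n b hi := by
  intro a b hi hab hfail
  by_cases h : a < b
  · by_cases h2 : a < hi
    · have hw : winB row a n = false := hfail a le_rfl h h2
      rw [tryRowB, dif_pos h2, if_neg (by simp [hw])]
      exact tryRowB_skip row r n (a + 1) b hi (by omega)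
        (fun s h1 h2 h3 => hfail s (by omega) h2 h3)
    · rw [tryRowB_none row r n a hi (by omega), tryRowB_none row r n b hi (by omega)]
  · have : a = b := le_antisymm hab (by omega)
    rw [this]
termination_by a b _ => (b - a).toNat

lemma winB_false_of_nonzero (row : List Int) (n : Int) (s : Int) (j : Nat)
    (hs : 0 ≤ s) (h1 : s ≤ (j : Int)) (h2 : (j : Int) < s + n) (hj : j < row.length)
    (hnz : row.getD j 0 ≠ 0) : winB row s n = false := by
  unfold winB
  rw [PySem.List.slice_toNat row hs (by omega)]
  rw [List.all_eq_false]
  refine ⟨row[j]'hj, ?_, by simpa using by simpa [List.getD_eq_getElem?_getD, List.getElem?_eq_getElem hj] using hnz⟩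
  have hlen : j - s.toNat < (row.drop s.toNat).length := by simp [List.length_drop]; omega
  have : ((row.drop s.toNat).take ((s + n).toNat - s.toNat))[j - s.toNat]'(by simp [List.length_take]; omega) = row[j]'hj := by
    rw [List.getElem_take, List.getElem_drop]
    congr 1; omega
  rw [← this]
  exact List.getElem_mem _

lemma winB_true_of_zeros (row : List Int) (n : Int) (s : Nat)
    (hn : 0 ≤ n) (hlen : (s : Int) + n ≤ (row.length : Int))
    (hz : ∀ j : Nat, s ≤ j → (j : Int) < (s : Int) + n → row.getD j 0 = 0) :
    winB row (s : Int) n = true := by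
  unfold winB
  rw [PySem.List.slice_toNat row (by omega) (by omega)]
  rw [List.all_eq_true]
  intro x hx
  rcases List.mem_iff_getElem.mp hx with ⟨i, hi, hxi⟩
  have hi2 : i < n.toNat := by simp [List.length_take, List.length_drop] at hi; omega
  have hsi : s + i < row.length := by omega
  have : x = row[s + i]'hsi := by
    rw [← hxi, List.getElem_take, List.getElem_drop]
    congr 1
  have hz2 := hz (s + i) (by omega) (by push_cast; omega)
  rw [List.getD_eq_getElem?_getD, List.getElem?_eq_getElem hsi] at hz2
  simp at hz2
  simp [this, hz2]

lemma inner_eq (row : List Int) (n r : Int) (cols : Nat) (hcl : cols ≤ row.length) (hn : 1 ≤ n) :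
    ∀ m c k (s0 : Int), c + m = cols → k ≤ c → (k : Int) < n →
      (0 < k → s0 = ((c - k : Nat) : Int)) →
      (∀ j, c - k ≤ j → j < c → row.getD j 0 = 0) →
      bookInnerA row n r (List.range' c m) (k : Int) s0 =
        optD (tryRowB row r n ((c - k : Nat) : Int) ((cols : Int) - n + 1)) := by
  intro m
  induction m with
  | zero =>
    intro c k s0 hcm hkc hkn hs0 hz
    rw [tryRowB_none _ _ _ _ _ (by omega)]
    simp [bookInnerA, optD]
  | succ m ih =>
    intro c k s0 hcm hkc hkn hs0 hz
    have hclen : c < row.length := by omega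
    rw [List.range'_succ]
    by_cases hv : row.getD c 0 = 0
    · have hs0' : (if (k : Int) = 0 then (c : Int) else s0) = ((c - k : Nat) : Int) := by
        by_cases hk0 : k = 0
        · simp [hk0]
        · rw [if_neg (by exact_mod_cast hk0), hs0 (Nat.pos_of_ne_zero hk0)]
      simp only [bookInnerA, hv, if_true, hs0']
      by_cases hb : (k : Int) + 1 = n
      · rw [if_pos hb]
        have hfirst : ((c - k : Nat) : Int) < (cols : Int) - n + 1 := by omega
        have hwin : winB row ((c - k : Nat) : Int) n = true := by
          apply winB_true_of_zeros row n (c - k) (by omega) (by omega)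
          intro j hj1 hj2
          by_cases hjc : j < c
          · exact hz j hj1 hjc
          · have : j = c := by omega
            rw [this]; exact hv
        rw [tryRowB, dif_pos hfirst, if_pos hwin]
        rfl
      · rw [if_neg hb]
        have := ih (c + 1) (k + 1) (if (k : Int) = 0 then (c : Int) else s0)
          (by omega) (by omega) (by omega)
          (fun _ => by rw [hs0', Nat.succ_sub_succ])
          (fun j hj1 hj2 => by
            rw [Nat.succ_sub_succ] at hj1
            by_cases hjc : j < c
            · exact hz j hj1 hjc
            · have : j = c := by omega
              rw [this]; exact hv)
        rw [Nat.succ_sub_succ] at this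
        rw [show ((k : Int) + 1) = ((k + 1 : Nat) : Int) by push_cast; ring]
        rw [hs0'] at this
        exact this
    · simp only [bookInnerA, if_neg hv]
      rw [if_neg (show ¬ (0 : Int) = n by omega)]
      have := ih (c + 1) 0 s0 (by omega) (by omega) (by omega)
        (by omega) (fun j hj1 hj2 => by omega)
      rw [Nat.cast_zero] at this
      rw [this, Nat.sub_zero]
      congr 1
      refine (tryRowB_skip row r n ((c - k : Nat) : Int) ((c + 1 : Nat) : Int) _ (by push_cast; omega) ?_).symm
      intro s hs1 hs2 hs3
      apply winB_false_of_nonzero row n s c (by omega) (by push_cast at hs2 ⊢; omega) (by omega) hclen hv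

lemma row_eq (row : List Int) (n r : Int) (cols : Nat) (hcl : cols ≤ row.length) (hn : 1 ≤ n) :
    bookInnerA row n r (List.range cols) 0 (-1) =
      optD (tryRowB row r n 0 ((cols : Int) - n + 1)) := by
  have := inner_eq row n r cols hcl hn cols 0 0 (-1) (by omega) (by omega) (by omega)
    (by omega) (by omega)
  rw [List.range_eq_range']
  simpa using this

lemma tryRowB_some_val (row : List Int) (r n : Int) :
    ∀ (s hi : Int) b, tryRowB row r n s hi = some b →
      ∃ t, b = (PySem.List.pyRange 0 n 1).map (fun i => (r + 1, t + i + 1)) := by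
  intro s hi b h
  by_cases hlt : s < hi
  · by_cases hw : winB row s n
    · rw [tryRowB, dif_pos hlt, if_pos hw] at h
      exact ⟨s, (Option.some.injEq _ _).mp h |>.symm⟩
    · rw [tryRowB, dif_pos hlt, if_neg hw] at h
      exact tryRowB_some_val row r n (s + 1) hi b h
  · rw [tryRowB_none _ _ _ _ _ (by omega)] at h
    exact absurd h (by simp)
termination_by s hi _ => (hi - s).toNat

lemma outer_eq (n : Int) (cols : Nat) (hn : 1 ≤ n) :
    ∀ rows (r : Int), (∀ row ∈ rows, cols ≤ row.length) →
      bookOuterA n cols rows r [] = rowsB n cols rows r := by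
  intro rows
  induction rows with
  | nil => intro r _; rfl
  | cons row rest ih =>
    intro r hcols
    have hrow : cols ≤ row.length := hcols row (by simp)
    show (if _ = n then _ else _) = _
    rw [List.nil_append, row_eq row n r cols hrow hn]
    cases htr : tryRowB row r n 0 ((cols : Int) - n + 1) with
    | none =>
      simp only [optD, Option.getD_none]
      rw [if_neg (by simp; omega)]
      simp only [rowsB, htr]
      exact ih (r + 1) (fun q hq => hcols q (by simp [hq]))
    | some b =>
      obtain ⟨t, hb⟩ := tryRowB_some_val row r n _ _ b htr
      have hlen : ((optD (some b)).length : Int) = n := by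
        simp [optD, hb, PySem.List.length_pyRange_one]
        omega
      rw [if_pos hlen]
      simp [rowsB, htr, optD]

lemma pyRange_nil (a hi : Int) (h : hi ≤ a) : PySem.List.pyRange a hi 1 = [] := by
  rw [PySem.List.pyRange_one]
  have : (hi - a).toNat = 0 := by omega
  simp [this]

lemma innerA_nonpos (row : List Int) (n r : Int) (hn : n ≤ 0) :
    ∀ js (k s0 : Int), 0 ≤ k → bookInnerA row n r js k s0 = [] := by
  intro js
  induction js with
  | nil => intro k s0 _; rfl
  | cons c rest ih =>
    intro k s0 hk
    by_cases hv : row.getD c 0 = 0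
    · simp only [bookInnerA, hv, if_true]
      by_cases hb : k + 1 = n
      · rw [if_pos hb, pyRange_nil 0 n hn]; rfl
      · rw [if_neg hb]; exact ih (k + 1) _ (by omega)
    · simp only [bookInnerA, hv, if_false]
      by_cases hb : (0 : Int) = n
      · rw [if_pos hb, pyRange_nil 0 n hn]; rfl
      · rw [if_neg hb]; exact ih 0 s0 (by omega)

lemma outerA_nonpos (n : Int) (cols : Nat) (hn : n ≤ 0) :
    ∀ rows (r : Int), bookOuterA n cols rows r [] = [] := by
  intro rows
  induction rows with
  | nil => intro r; rfl
  | cons row rest ih =>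
    intro r
    show (if _ = n then _ else _) = _
    rw [List.nil_append, innerA_nonpos row n r hn _ 0 (-1) (by omega)]
    by_cases hb : ((List.length ([] : List (Int × Int)) : Int)) = n
    · rw [if_pos hb]
    · rw [if_neg hb]; exact ih (r + 1)

lemma rowsB_nonpos (n : Int) (cols : Nat) (hn : n ≤ 0) :
    ∀ rows (r : Int), rowsB n cols rows r = [] := by
  intro rows
  induction rows with
  | nil => intro r; rfl
  | cons row rest ih =>
    intro r
    cases htr : tryRowB row r n 0 ((cols : Int) - n + 1) with
    | none => simp only [rowsB, htr]; exact ih (r + 1)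
    | some b =>
      obtain ⟨t, hb⟩ := tryRowB_some_val row r n _ _ b htr
      rw [pyRange_nil 0 n hn] at hb
      simp [rowsB, htr, hb]

-- ===== VERDICT (by name: the statement is the Claim_ definition above) =====
theorem book_seats_spec : Claim_equal_book_seats := by
  intro seats n _hdom hpre
  unfold Spec_book_seats
  cases seats with
  | nil => exact absurd rfl hpre.1
  | cons r0 rest =>
    show bookOuterA n r0.length (r0 :: rest) 0 [] = rowsB n r0.length (r0 :: rest) 0
    by_cases hn : 1 ≤ n
    · exact outer_eq n r0.length hn (r0 :: rest) 0
        (fun row hr => by simpa using hpre.2 row hr)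
    · rw [outerA_nonpos n r0.length (by omega) (r0 :: rest) 0,
          rowsB_nonpos n r0.length (by omega) (r0 :: rest) 0]
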